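-- pv_equiv track=rewrite | github.com/kang-tuo/Daily-Coding-Practice | HackerRank/Magic Tavern.py | solution
-- ===== SOURCE A (Python) =====
-- def get_divisors_set(n):
--     if n <= 3:
--         return [1]
--     else:
--         d_set = [1]
--         for i in range(2, n):
--             if n % i == 0:
--                 d_set.append(i)
--         return d_set
--
-- def get_subsets(d_set):
--     subsets = [[]]
--     for i in range(len(d_set)):
--         for j in range(len(subsets)):
--             subsub = subsets[j].copy()
--             subsub.append(d_set[i])
--             subsets.append(subsub)
--     return subsets
--
-- def condition_two(subsets, n):
--     for subset in subsets:
--         if sum(subset) == n: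
--             return False
--     return True
--
-- def solution(n):
--     results = []
--     for i in range(1, n + 1):
--         d_set = get_divisors_set(i)
--         if sum(d_set) > i:
--             subsets = get_subsets(d_set)
--             if condition_two(subsets, i):
--                 results.append(i)
--     return results
-- ===== SOURCE B (Python) =====
-- def solution(n):
--     results = []
--     for i in range(1, n + 1):
--         divs = [d for d in range(1, i) if i % d == 0]
--         if sum(divs) > i:
--             reach = {0}
--             for d in divs:
--                 reach = reach | {r + d for r in reach}
--             if i not in reach:
--                 results.append(i)
--     return results
-- ===== Notes on version B (the rewrite author's own statement) =====
-- stated objective: faster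
-- what changed: B replaces A's explicit enumeration of all 2^d divisor subsets (and a scan of their sums) with a reachable-sums set built by subset-sum dynamic programming, and computes proper divisors with a single filtered range instead of A's special-cased helper.
import Mathlib
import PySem

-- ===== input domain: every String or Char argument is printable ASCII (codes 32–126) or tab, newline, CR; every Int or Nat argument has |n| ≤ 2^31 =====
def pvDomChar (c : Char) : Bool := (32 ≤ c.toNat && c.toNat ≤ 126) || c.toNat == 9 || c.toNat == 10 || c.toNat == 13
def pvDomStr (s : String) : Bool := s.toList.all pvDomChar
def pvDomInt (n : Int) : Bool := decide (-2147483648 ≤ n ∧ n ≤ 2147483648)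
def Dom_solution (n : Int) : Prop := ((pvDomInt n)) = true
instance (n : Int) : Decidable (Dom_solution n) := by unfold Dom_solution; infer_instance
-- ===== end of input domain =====

-- B lists the same weird numbers via a subset-sum reachability set instead of
-- enumerating all divisor subsets (objective: faster, asymptotically).

-- ===== PORT A =====
def getDivisorsSet (n : Int) : List Int :=
  if n ≤ 3 then [1]
  else (PySem.List.pyRange 2 n 1).foldl
    (fun dSet i => if PySem.Int.mod n i == 0 then dSet ++ [i] else dSet) [1]

def getSubsets (dSet : List Int) : List (List Int) :=
  dSet.foldl (fun subsets d => subsets ++ subsets.map (fun s => s ++ [d])) [[]]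

def conditionTwo (subsets : List (List Int)) (n : Int) : Bool :=
  match subsets with
  | [] => true
  | s :: rest => if s.sum == n then false else conditionTwo rest n

def solution (n : Int) : List Int :=
  (PySem.List.pyRange 1 (n + 1) 1).foldl
    (fun results i =>
      let dSet := getDivisorsSet i
      if dSet.sum > i then
        (if conditionTwo (getSubsets dSet) i then results ++ [i] else results)
      else results) []

-- ===== PORT B =====
def properDivisors (i : Int) : List Int :=
  (PySem.List.pyRange 1 i 1).filter (fun d => PySem.Int.mod i d == 0)

def reachSums (divs : List Int) : PySem.Set Int :=
  divs.foldl (fun reach d => PySem.Set.union reach (reach.map (· + d)))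
    (PySem.Set.ofList [0])

def solution_alt (n : Int) : List Int :=
  (PySem.List.pyRange 1 (n + 1) 1).foldl
    (fun results i =>
      let divs := properDivisors i
      if divs.sum > i then
        (if PySem.Set.contains (reachSums divs) i then results
         else results ++ [i])
      else results) []

-- ===== PRECONDITION & SPEC =====
def Spec_solution (n : Int) (out : List Int) : Prop := out = solution_alt n
instance (n : Int) (out : List Int) : Decidable (Spec_solution n out) := by unfold Spec_solution; infer_instance

-- ===== CLAIM (what is proved, stated in full; the proofs are below) =====
def Claim_equal_solution : Prop := ∀ (n : Int), Dom_solution n → Spec_solution n (solution n)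

-- ===== LEMMAS AND PROOFS =====

-- A's divisor list equals B's filtered range for every i ≥ 2.
theorem divisors_eq (i : Int) (hi : 2 ≤ i) : getDivisorsSet i = properDivisors i := by
  by_cases h3 : i ≤ 3
  · have : i = 2 ∨ i = 3 := by omega
    rcases this with rfl | rfl <;> decide
  · unfold getDivisorsSet properDivisors
    rw [if_neg (by omega)]
    rw [PySem.List.foldl_append_if_eq_filter]
    rw [PySem.List.pyRange_one_cons (by omega : (1:Int) < i)]
    simp

-- conditionTwo is "no listed subset sums to n".
theorem conditionTwo_iff (ss : List (List Int)) (n : Int) :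
    conditionTwo ss n = true ↔ ∀ s ∈ ss, s.sum ≠ n := by
  induction ss with
  | nil => simp [conditionTwo]
  | cons s rest ih =>
    by_cases h : s.sum = n
    · simp [conditionTwo, h]
    · simp [conditionTwo, h, ih]

-- DP invariant: the reachable-sums set has exactly the sums of the enumerated subsets.
theorem reach_invariant (ds : List Int) (S : PySem.Set Int) (ss : List (List Int))
    (h : ∀ x, x ∈ S ↔ ∃ s ∈ ss, s.sum = x) :
    ∀ x, x ∈ ds.foldl (fun reach d => PySem.Set.union reach (reach.map (· + d))) S ↔
      ∃ s ∈ ds.foldl (fun subsets d => subsets ++ subsets.map (fun s => s ++ [d])) ss, s.sum = x := by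
  induction ds generalizing S ss with
  | nil => simpa using h
  | cons d ds ih =>
    intro x
    simp only [List.foldl_cons]
    refine ih _ _ (fun y => ?_) x
    rw [PySem.Set.mem_union]
    constructor
    · rintro (hy | hy)
      · obtain ⟨s, hs, rfl⟩ := (h y).1 hy
        exact ⟨s, List.mem_append_left _ hs, rfl⟩
      · rcases List.mem_map.1 hy with ⟨r, hr, rfl⟩
        obtain ⟨s, hs, rfl⟩ := (h r).1 hr
        refine ⟨s ++ [d], ?_, by simp⟩
        exact List.mem_append_right _ (List.mem_map.2 ⟨s, hs, rfl⟩)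
    · rintro ⟨s, hs, rfl⟩
      rcases List.mem_append.1 hs with hs | hs
      · exact Or.inl ((h _).2 ⟨s, hs, rfl⟩)
      · rcases List.mem_map.1 hs with ⟨t, ht, rfl⟩
        exact Or.inr (List.mem_map.2 ⟨t.sum, (h _).2 ⟨t, ht, rfl⟩, by simp⟩)

theorem mem_reachSums (ds : List Int) (x : Int) :
    x ∈ reachSums ds ↔ ∃ s ∈ getSubsets ds, s.sum = x := by
  unfold reachSums getSubsets
  exact reach_invariant ds _ _ (by simp [PySem.Set.mem_ofList, eq_comm]) x

-- the two per-i loop bodies agree for every i ≥ 1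
theorem step_eq (results : List Int) (i : Int) (hi : 1 ≤ i) :
    (let dSet := getDivisorsSet i
     if dSet.sum > i then
       (if conditionTwo (getSubsets dSet) i then results ++ [i] else results)
     else results) =
    (let divs := properDivisors i
     if divs.sum > i then
       (if PySem.Set.contains (reachSums divs) i then results else results ++ [i])
     else results) := by
  by_cases h1 : i = 1
  · subst h1
    norm_num [getDivisorsSet, properDivisors, PySem.List.pyRange_one_eq_nil]
  · have h2 : 2 ≤ i := by omega
    simp only [divisors_eq i h2]
    by_cases hc : (properDivisors i).sum > i
    · simp only [if_pos hc]
      by_cases hm : i ∈ reachSums (properDivisors i)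
      · have hct : conditionTwo (getSubsets (properDivisors i)) i = false := by
          rw [← Bool.not_eq_true, conditionTwo_iff]
          obtain ⟨s, hs, hsum⟩ := (mem_reachSums _ _).1 hm
          exact fun hall => hall s hs hsum
        simp [hct, hm]
      · have hct : conditionTwo (getSubsets (properDivisors i)) i = true := by
          rw [conditionTwo_iff]
          intro s hs hsum
          exact hm ((mem_reachSums _ _).2 ⟨s, hs, hsum⟩)
        simp [hct, hm]
    · simp only [if_neg hc]

-- ===== VERDICT (by name: the statement is the Claim_ definition above) =====
theorem solution_spec : Claim_equal_solution := by
  intro n _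
  unfold Spec_solution solution solution_alt
  apply PySem.List.foldl_congr_mem
  intro acc i hmem
  have h1 : 1 ≤ i := (PySem.List.mem_pyRange_one.1 hmem).1
  exact step_eq acc i h1
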